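-- pv_equiv track=rewrite | github.com/0-EricZhou-0/python-utils | python_util.py | get_line_without_first_word
-- ===== SOURCE A (Python) =====
-- def get_line_without_first_word(line: str) -> str:
--     """
--     Get the line without the first word.
--     The first word is defined as the first sequence of non-whitespace characters.
--     @param line The input line.
--     @return The line without the first word.
--     """
--     leading_space_end = -2
--     leading_word_end = -1
--     for i, c in enumerate(line):
--         if c.isspace():
--             if leading_space_end >= -1:
--                 leading_word_end = i - 1
--         else:
--             if leading_space_end < -1:
--                 leading_space_end = i - 1
--             elif leading_word_end >= 0:
--                 return line[i:]
--     return ""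
-- ===== SOURCE B (Python) =====
-- def get_line_without_first_word(line: str) -> str:
--     """
--     Get the line without the first word.
--     The first word is defined as the first sequence of non-whitespace characters.
--     @param line The input line.
--     @return The line without the first word.
--     """
--     parts = line.split(None, 1)
--     return parts[1] if len(parts) == 2 else ""
-- ===== Notes on version B (the rewrite author's own statement) =====
-- stated objective: idiomatic
-- what changed: Replaced the explicit two-counter character-scanning state machine with str.split(None, 1), returning the second piece when the split yields two pieces and the empty string otherwise.
import Mathlib
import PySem

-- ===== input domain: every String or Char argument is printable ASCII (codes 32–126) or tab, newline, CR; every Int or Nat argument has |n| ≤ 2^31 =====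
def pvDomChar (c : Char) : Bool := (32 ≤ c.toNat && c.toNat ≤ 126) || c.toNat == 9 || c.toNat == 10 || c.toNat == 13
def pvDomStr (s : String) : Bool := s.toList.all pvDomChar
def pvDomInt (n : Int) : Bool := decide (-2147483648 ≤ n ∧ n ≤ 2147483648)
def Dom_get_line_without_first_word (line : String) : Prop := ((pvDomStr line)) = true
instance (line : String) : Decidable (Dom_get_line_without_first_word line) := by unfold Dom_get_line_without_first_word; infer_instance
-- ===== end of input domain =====

-- B replaces A's explicit two-counter character scan with str.split(None, 1); objective: idiomatic/simpler.

-- ===== PORT A =====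
-- the enumerate loop: i is the running index, lse/lwe are A's leading_space_end / leading_word_end;
-- the early return 'line[i:]' is the remaining suffix c :: rest at index i
def getLineGoA (i : Nat) (lse lwe : Int) : List Char → List Char
  | [] => []                                   -- loop ends: return ""
  | c :: rest =>
    if PySem.Chars.isspace c then
      if lse ≥ -1 then getLineGoA (i + 1) lse ((i : Int) - 1) rest
      else getLineGoA (i + 1) lse lwe rest
    else
      if lse < -1 then getLineGoA (i + 1) ((i : Int) - 1) lwe rest
      else if lwe ≥ 0 then c :: rest           -- return line[i:]
      else getLineGoA (i + 1) lse lwe rest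

def get_line_without_first_word (line : String) : String :=
  String.ofList (getLineGoA 0 (-2) (-1) line.toList)

-- ===== PORT B =====
def get_line_without_first_word_alt (line : String) : String :=
  let parts := PySem.Str.split₀Max line 1      -- line.split(None, 1)
  if parts.length = 2 then parts[1]! else ""

-- ===== PRECONDITION & SPEC =====
def Spec_get_line_without_first_word (line : String) (out : String) : Prop := out = get_line_without_first_word_alt line
instance (line : String) (out : String) : Decidable (Spec_get_line_without_first_word line out) := by unfold Spec_get_line_without_first_word; infer_instance

-- ===== CLAIM (what is proved, stated in full; the proofs are below) =====
def Claim_equal_get_line_without_first_word : Prop := ∀ (line : String), Dom_get_line_without_first_word line → Spec_get_line_without_first_word line (get_line_without_first_word line)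

-- ===== LEMMAS AND PROOFS =====

-- phase 3 of A's scan (first word and a following space already seen): skip whitespace, return the rest
theorem getLineGoA_phase3 (l : List Char) (i : Nat) (lse lwe : Int)
    (hse : lse ≥ -1) (hwe : lwe ≥ 0) (hi : 1 ≤ i) :
    getLineGoA i lse lwe l = l.dropWhile PySem.Chars.isspace := by
  induction l generalizing i lwe with
  | nil => simp [getLineGoA]
  | cons c rest ih =>
    by_cases hc : PySem.Chars.isspace c
    · simp [getLineGoA, hc, hse, ih (i + 1) ((i : Int) - 1) (by omega) (by omega)]
    · simp [getLineGoA, hc, show ¬ lse < -1 by omega, hwe]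

-- phase 2 (inside the first word, no space after it seen yet): skip the word, then phase 3
theorem getLineGoA_phase2 (l : List Char) (i : Nat) (lse : Int)
    (hse : lse ≥ -1) (hi : 1 ≤ i) :
    getLineGoA i lse (-1) l =
      (l.dropWhile (fun c => !PySem.Chars.isspace c)).dropWhile PySem.Chars.isspace := by
  induction l generalizing i with
  | nil => simp [getLineGoA]
  | cons c rest ih =>
    by_cases hc : PySem.Chars.isspace c
    · rw [getLineGoA]
      simp only [hc, if_true, hse, ge_iff_le]
      rw [getLineGoA_phase3 rest (i + 1) lse ((i : Int) - 1) hse (by omega) (by omega)]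
      simp [hc]
    · simp [getLineGoA, hc, show ¬ lse < -1 by omega, ih (i + 1) (by omega)]

-- phase 1 (leading whitespace): A's whole scan in closed form
theorem getLineGoA_closed (l : List Char) (i : Nat) :
    getLineGoA i (-2) (-1) l =
      ((l.dropWhile PySem.Chars.isspace).dropWhile (fun c => !PySem.Chars.isspace c)).dropWhile
        PySem.Chars.isspace := by
  induction l generalizing i with
  | nil => simp [getLineGoA]
  | cons c rest ih =>
    by_cases hc : PySem.Chars.isspace c
    · simp [getLineGoA, hc, ih (i + 1)]
    · rw [getLineGoA]
      simp only [hc, if_false, Bool.false_eq_true]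
      rw [if_pos (show (-2 : Int) < -1 by norm_num)]
      rw [getLineGoA_phase2 rest (i + 1) ((i : Int) - 1) (by omega) (by omega)]
      simp [hc]

-- B's split₀Max with maxsplit = 1, in the same closed form
theorem split₀Max_one (l : List Char) :
    PySem.Chars.split₀Max l 1 =
      if l.dropWhile PySem.Chars.isspace = [] then []
      else if ((l.dropWhile PySem.Chars.isspace).dropWhile
              (fun c => !PySem.Chars.isspace c)).dropWhile PySem.Chars.isspace = [] then
        [(l.dropWhile PySem.Chars.isspace).takeWhile (fun c => !PySem.Chars.isspace c)]
      else
        [(l.dropWhile PySem.Chars.isspace).takeWhile (fun c => !PySem.Chars.isspace c),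
         ((l.dropWhile PySem.Chars.isspace).dropWhile
            (fun c => !PySem.Chars.isspace c)).dropWhile PySem.Chars.isspace] := by
  unfold PySem.Chars.split₀Max
  rw [if_neg (by norm_num)]
  show PySem.Chars.split₀Max.go (l.length + 1) 1 l [] = _
  rw [PySem.Chars.split₀Max.go]
  cases hd : List.dropWhile PySem.Chars.isspace l with
  | nil => simp
  | cons a t =>
    have hl : l ≠ [] := by intro h; rw [h] at hd; simp at hd
    obtain ⟨k, hk⟩ : ∃ k, l.length = k + 1 := by
      cases l with
      | nil => exact absurd rfl hl
      | cons x xs => exact ⟨xs.length, rfl⟩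
    simp only [hk]
    rw [if_neg one_ne_zero, PySem.Chars.split₀Max.go]
    rw [if_neg (List.cons_ne_nil a t)]
    cases hd2 : List.dropWhile PySem.Chars.isspace
        (List.dropWhile (fun c => !PySem.Chars.isspace c) (a :: t)) with
    | nil => simp
    | cons b u => simp

-- ===== VERDICT (by name: the statement is the Claim_ definition above) =====
theorem get_line_without_first_word_spec : Claim_equal_get_line_without_first_word := by
  intro line _
  unfold Spec_get_line_without_first_word get_line_without_first_word get_line_without_first_word_alt
  rw [getLineGoA_closed]
  unfold PySem.Str.split₀Max
  rw [split₀Max_one line.toList]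
  by_cases h1 : line.toList.dropWhile PySem.Chars.isspace = []
  · rw [if_pos h1]
    simp [h1]
  · rw [if_neg h1]
    by_cases h2 : ((line.toList.dropWhile PySem.Chars.isspace).dropWhile
        (fun c => !PySem.Chars.isspace c)).dropWhile PySem.Chars.isspace = []
    · rw [if_pos h2]
      simp [h2]
    · rw [if_neg h2]
      simp
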